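-- pv_equiv track=rewrite | github.com/he7850/genshin-impact-lyre-song-autoplay | lyresong-autoplay.py | note2key
-- ===== SOURCE A (Python) =====
-- def note2key(note, base=48):
--     # do = 60
--     # ri = 62
--     # mi = 64
--     # fa = 65
--     # so = 67
--     # la = 69
--     # xi = 71
--     # do = 72
--     notes = [0, 2, 4, 5, 7, 9, 11]
--     keys = [
--         ['z', 'x', 'c', 'v', 'b', 'n', 'm'],
--         ['a', 's', 'd', 'f', 'g', 'h', 'j'],
--         ['q', 'w', 'e', 'r', 't', 'y', 'u'],
--     ]
--     index0 = (note - base) // 12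
--     note0 = note % 12
--     index1 = 0
--     for i in range(7):
--         if notes[i] == note0:
--             index1 = i
--             break
--         if notes[i] > note0:
--             index1 = i
--             break
--     if 0 <= index0 <= 2 and 0 <= index1 <= 6:
--         return note0, keys[index0][index1]
--     return note, None
-- ===== SOURCE B (Python) =====
-- def note2key(note, base=48):
--     # Closed-form arithmetic instead of scanning a scale list: a pitch class pc
--     # maps to key column (pc + 1 + (pc >= 5)) // 2, and the keyboard is one flat
--     # string indexed by 7*row + col.
--     row = (note - base) // 12
--     if row < 0 or row > 2:
--         return note, None
--     pc = note % 12
--     col = (pc + 1 + (pc >= 5)) // 2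
--     return pc, "zxcvbnmasdfghjqwertyu"[7 * row + col]
-- ===== Notes on version B (the rewrite author's own statement) =====
-- stated objective: simpler
-- what changed: The scan over the scale list with break and the nested 3x7 key table are replaced by a closed-form arithmetic column formula (pc + 1 + (pc >= 5)) // 2 and a single flat 21-character keyboard string indexed by 7*row + col; the row bound is checked up front with an early return and A's always-true index1 check disappears.
import Mathlib
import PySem

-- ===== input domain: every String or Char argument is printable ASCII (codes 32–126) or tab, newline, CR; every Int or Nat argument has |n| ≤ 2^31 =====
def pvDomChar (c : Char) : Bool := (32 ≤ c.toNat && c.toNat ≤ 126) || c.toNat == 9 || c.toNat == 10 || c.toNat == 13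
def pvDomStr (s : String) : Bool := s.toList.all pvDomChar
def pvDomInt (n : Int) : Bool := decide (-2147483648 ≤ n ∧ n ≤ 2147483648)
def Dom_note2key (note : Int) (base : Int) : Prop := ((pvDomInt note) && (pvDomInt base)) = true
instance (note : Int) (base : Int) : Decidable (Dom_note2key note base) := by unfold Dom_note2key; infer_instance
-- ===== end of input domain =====

-- B replaces A's list scan and nested key table by a closed-form arithmetic column formula and one flat keyboard string (objective: simpler).

-- ===== PORT A =====
-- transliteration of the for-i-in-range(7) scan with break; notes[i] is always
-- in range (i < 7 = len(notes)), so pyGetD is exact here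
def note2keyScan (notes : List Int) (note0 : Int) (is : List Int) (acc : Int) : Int :=
  match is with
  | [] => acc
  | i :: rest =>
    if PySem.List.pyGetD notes i 0 = note0 then i
    else if PySem.List.pyGetD notes i 0 > note0 then i
    else note2keyScan notes note0 rest acc

def note2key (note : Int) (base : Int) : Int × Option String :=
  let notes : List Int := [0, 2, 4, 5, 7, 9, 11]
  let keys : List (List String) :=
    [["z", "x", "c", "v", "b", "n", "m"],
     ["a", "s", "d", "f", "g", "h", "j"],
     ["q", "w", "e", "r", "t", "y", "u"]]
  let index0 := PySem.Int.floordiv (note - base) 12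
  let note0 := PySem.Int.mod note 12
  let index1 := note2keyScan notes note0 (PySem.List.pyRange 0 7 1) 0
  if 0 ≤ index0 ∧ index0 ≤ 2 ∧ 0 ≤ index1 ∧ index1 ≤ 6 then
    -- keys[index0][index1]: in range under the guard, so pyGetD is exact
    (note0, some (PySem.List.pyGetD (PySem.List.pyGetD keys index0 []) index1 ""))
  else (note, none)

-- ===== PORT B =====
def note2key_alt (note : Int) (base : Int) : Int × Option String :=
  let row := PySem.Int.floordiv (note - base) 12
  if row < 0 ∨ row > 2 then (note, none)
  else
    let pc := PySem.Int.mod note 12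
    -- (pc >= 5) as an int, exactly Python's bool-to-int arithmetic
    let col := PySem.Int.floordiv (pc + 1 + (if pc ≥ 5 then 1 else 0)) 2
    -- flat[7*row+col]: in range under the guard, so the index never raises;
    -- Python's 1-character str result is the singleton string of that char
    (pc, (PySem.Str.pyGet? "zxcvbnmasdfghjqwertyu" (7 * row + col)).map (fun c => String.ofList [c]))

-- ===== PRECONDITION & SPEC =====
def Spec_note2key (note : Int) (base : Int) (out : Int × Option String) : Prop := out = note2key_alt note base
instance (note : Int) (base : Int) (out : Int × Option String) : Decidable (Spec_note2key note base out) := by unfold Spec_note2key; infer_instance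

-- ===== CLAIM (what is proved, stated in full; the proofs are below) =====
def Claim_equal_note2key : Prop := ∀ (note : Int) (base : Int), Dom_note2key note base → Spec_note2key note base (note2key note base)

-- ===== LEMMAS AND PROOFS =====

-- ===== VERDICT (by name: the statement is the Claim_ definition above) =====
theorem note2key_spec : Claim_equal_note2key := by
  intro note base _
  unfold Spec_note2key note2key note2key_alt
  have h0 : 0 ≤ PySem.Int.mod note 12 := PySem.Int.mod_nonneg note (by norm_num)
  have h1 : PySem.Int.mod note 12 < 12 := PySem.Int.mod_lt note (by norm_num)
  generalize hP : PySem.Int.mod note 12 = p at h0 h1 ⊢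
  generalize hR : PySem.Int.floordiv (note - base) 12 = r
  by_cases hg : 0 ≤ r ∧ r ≤ 2
  · obtain ⟨hg0, hg1⟩ := hg
    interval_cases r <;> interval_cases p <;>
      (rw [if_pos (by decide), if_neg (by decide)]; decide)
  · rw [if_neg (fun h => hg ⟨h.1, h.2.1⟩), if_pos (by omega)]
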